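-- pv_equiv track=rewrite | github.com/abinaze/bharatgraph | ai/connection_mapper.py | _derive_risk_factors
-- ===== SOURCE A (Python) =====
-- def _derive_risk_factors(entity_row: dict, edges: list) -> list:
--     factors = []
--     if entity_row.get("criminal_cases") and int(entity_row["criminal_cases"] or 0) > 0:
--         factors.append(f"{entity_row['criminal_cases']} declared criminal case(s) in ECI affidavit")
--     strong_edges = [e for e in edges if e.get("strength") == "strong"]
--     if len(strong_edges) >= 3:
--         factors.append(f"{len(strong_edges)} high-strength connections to government contracts/audits")
--     if any(e.get("relationship") in ("FLAGS","AUDITS") for e in edges):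
--         factors.append("Connected to CAG audit flags")
--     if any(e.get("node_type") in ("EnforcementAction","SanctionedEntity") for e in edges):
--         factors.append("Connected to enforcement actions or sanctions")
--     return factors
-- ===== SOURCE B (Python) =====
-- def _derive_risk_factors(entity_row: dict, edges: list) -> list:
--     # Single pass over edges accumulating all three edge-derived signals at once.
--     strong = 0
--     flagged = False
--     sanctioned = False
--     for e in edges:
--         if e.get("strength") == "strong":
--             strong += 1
--         if e.get("relationship") in ("FLAGS", "AUDITS"):
--             flagged = True
--         if e.get("node_type") in ("EnforcementAction", "SanctionedEntity"):
--             sanctioned = True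
--     factors = []
--     cc = entity_row.get("criminal_cases")
--     if cc and int(cc) > 0:
--         factors.append(f"{cc} declared criminal case(s) in ECI affidavit")
--     if strong >= 3:
--         factors.append(f"{strong} high-strength connections to government contracts/audits")
--     if flagged:
--         factors.append("Connected to CAG audit flags")
--     if sanctioned:
--         factors.append("Connected to enforcement actions or sanctions")
--     return factors
-- ===== Notes on version B (the rewrite author's own statement) =====
-- stated objective: alternative
-- what changed: Replaces the strong-edges list comprehension and the two any() scans (three passes over edges) by one loop that accumulates a strong-edge counter and two flags in a single pass, then emits the factors in the original order.
-- outside the precondition, e.g. on _derive_risk_factors({'criminal_cases': 'two'}, []): A raises ValueError, B raises ValueError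
import Mathlib
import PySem

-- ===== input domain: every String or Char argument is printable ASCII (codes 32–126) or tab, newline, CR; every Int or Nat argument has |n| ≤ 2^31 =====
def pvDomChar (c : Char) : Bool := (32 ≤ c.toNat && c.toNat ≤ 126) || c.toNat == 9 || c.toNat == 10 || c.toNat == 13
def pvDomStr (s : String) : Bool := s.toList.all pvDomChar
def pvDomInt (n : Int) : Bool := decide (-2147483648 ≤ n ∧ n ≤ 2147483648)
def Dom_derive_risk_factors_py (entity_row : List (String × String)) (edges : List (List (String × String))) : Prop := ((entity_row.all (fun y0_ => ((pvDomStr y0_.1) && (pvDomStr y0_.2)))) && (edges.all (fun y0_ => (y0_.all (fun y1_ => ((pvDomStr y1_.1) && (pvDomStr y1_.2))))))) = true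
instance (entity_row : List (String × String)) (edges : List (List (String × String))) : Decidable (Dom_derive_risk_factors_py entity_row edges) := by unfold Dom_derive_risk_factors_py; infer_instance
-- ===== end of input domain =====

-- B differs from A by decomposition only: one pass over edges accumulating a counter and two flags
-- instead of a list comprehension plus two any() scans. Equivalence is claimed on Pre_ (where int() parses).

-- ===== PORT A =====
-- the criminal_cases factor of A: get truthy (nonempty string), int(s or 0) > 0, f-string
def pvCrimFactor (entity_row : List (String × String)) : List String :=
  match (PySem.Dict.mk entity_row).get? "criminal_cases" with
  | none => []
  | some s =>
    if s = "" then []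
    else
      match PySem.Int.ofStr? s with
      | some n => if n > 0 then [s ++ " declared criminal case(s) in ECI affidavit"] else []
      | none => []  -- int() raises here; excluded by Pre_

def derive_risk_factors_py (entity_row : List (String × String)) (edges : List (List (String × String))) : List String :=
  let factors := pvCrimFactor entity_row
  let strong_edges := edges.filter (fun e => (PySem.Dict.mk e).get? "strength" == some "strong")
  let factors := if strong_edges.length ≥ 3 then
      factors ++ [PySem.Int.toStr (strong_edges.length : Int) ++ " high-strength connections to government contracts/audits"]
    else factors
  let factors := if edges.any (fun e =>
      (PySem.Dict.mk e).get? "relationship" == some "FLAGS" || (PySem.Dict.mk e).get? "relationship" == some "AUDITS") then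
      factors ++ ["Connected to CAG audit flags"] else factors
  let factors := if edges.any (fun e =>
      (PySem.Dict.mk e).get? "node_type" == some "EnforcementAction" || (PySem.Dict.mk e).get? "node_type" == some "SanctionedEntity") then
      factors ++ ["Connected to enforcement actions or sanctions"] else factors
  factors

-- ===== PORT B =====
-- one fold over edges: (strong counter, FLAGS/AUDITS flag, enforcement flag)
def pvEdgeStep (st : Nat × Bool × Bool) (e : List (String × String)) : Nat × Bool × Bool :=
  let strong := if (PySem.Dict.mk e).get? "strength" == some "strong" then st.1 + 1 else st.1
  let flagged := st.2.1 || (PySem.Dict.mk e).get? "relationship" == some "FLAGS"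
                        || (PySem.Dict.mk e).get? "relationship" == some "AUDITS"
  let sanctioned := st.2.2 || (PySem.Dict.mk e).get? "node_type" == some "EnforcementAction"
                           || (PySem.Dict.mk e).get? "node_type" == some "SanctionedEntity"
  (strong, flagged, sanctioned)

def derive_risk_factors_py_alt (entity_row : List (String × String)) (edges : List (List (String × String))) : List String :=
  let st := edges.foldl pvEdgeStep (0, false, false)
  let factors :=
    match (PySem.Dict.mk entity_row).get? "criminal_cases" with
    | none => []
    | some s =>
      if s = "" then []
      else
        match PySem.Int.ofStr? s with
        | some n => if n > 0 then [s ++ " declared criminal case(s) in ECI affidavit"] else []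
        | none => []  -- int() raises here; excluded by Pre_
  let factors := if st.1 ≥ 3 then
      factors ++ [PySem.Int.toStr (st.1 : Int) ++ " high-strength connections to government contracts/audits"]
    else factors
  let factors := if st.2.1 then factors ++ ["Connected to CAG audit flags"] else factors
  let factors := if st.2.2 then factors ++ ["Connected to enforcement actions or sanctions"] else factors
  factors

-- ===== PRECONDITION & SPEC =====
-- Pre_ excludes the inputs where Python raises ValueError: a present, nonempty "criminal_cases"
-- value that int() cannot parse (both A and B raise there).
def Pre_derive_risk_factors_py (entity_row : List (String × String)) (edges : List (List (String × String))) : Prop :=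
  (((PySem.Dict.mk entity_row).get? "criminal_cases").all
    (fun s => s == "" || (PySem.Int.ofStr? s).isSome)) = true
instance (entity_row : List (String × String)) (edges : List (List (String × String))) : Decidable (Pre_derive_risk_factors_py entity_row edges) := by unfold Pre_derive_risk_factors_py; infer_instance

def pvWitness_derive_risk_factors_py : (List (String × String)) × (List (List (String × String))) :=
  ([("criminal_cases", "2")], [[("strength", "strong"), ("relationship", "FLAGS")]])

def Spec_derive_risk_factors_py (entity_row : List (String × String)) (edges : List (List (String × String))) (out : List String) : Prop := out = derive_risk_factors_py_alt entity_row edges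
instance (entity_row : List (String × String)) (edges : List (List (String × String))) (out : List String) : Decidable (Spec_derive_risk_factors_py entity_row edges out) := by unfold Spec_derive_risk_factors_py; infer_instance

-- ===== CLAIM (what is proved, stated in full; the proofs are below) =====
def Claim_equal_derive_risk_factors_py : Prop := ∀ (entity_row : List (String × String)) (edges : List (List (String × String))), Dom_derive_risk_factors_py entity_row edges → Pre_derive_risk_factors_py entity_row edges → Spec_derive_risk_factors_py entity_row edges (derive_risk_factors_py entity_row edges)

-- ===== LEMMAS AND PROOFS =====

-- the fold computes exactly the three quantities A's three scans compute
theorem pvEdgeStep_foldl (edges : List (List (String × String))) (a : Nat) (b c : Bool) :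
    edges.foldl pvEdgeStep (a, b, c) =
      (a + (edges.filter (fun e => (PySem.Dict.mk e).get? "strength" == some "strong")).length,
       b || edges.any (fun e => (PySem.Dict.mk e).get? "relationship" == some "FLAGS"
                             || (PySem.Dict.mk e).get? "relationship" == some "AUDITS"),
       c || edges.any (fun e => (PySem.Dict.mk e).get? "node_type" == some "EnforcementAction"
                             || (PySem.Dict.mk e).get? "node_type" == some "SanctionedEntity")) := by
  induction edges generalizing a b c with
  | nil => simp
  | cons e t ih =>
    simp only [List.foldl_cons, pvEdgeStep, List.filter_cons, List.any_cons]
    rw [ih]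
    simp only [Prod.mk.injEq]
    refine ⟨?_, ?_, ?_⟩
    · split <;> simp <;> omega
    · cases b <;> simp [Bool.or_assoc]
    · cases c <;> simp [Bool.or_assoc]

-- ===== VERDICT (by name: the statement is the Claim_ definition above) =====
theorem derive_risk_factors_py_spec : Claim_equal_derive_risk_factors_py := by
  intro entity_row edges _ _
  unfold Spec_derive_risk_factors_py derive_risk_factors_py derive_risk_factors_py_alt pvCrimFactor
  rw [pvEdgeStep_foldl]
  simp
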